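-- pv_equiv track=rewrite | github.com/MrBrantCode/unitest_baseline | mut_generate/mist_train_cf/cf_78247/solution.py | seven_six_ten
-- ===== SOURCE A (Python) =====
-- def seven_six_ten(n: int) -> int:
--     def is_prime(num):
--         if num in (2, 3):
--             return True
--         if num < 2 or num % 2 == 0:
--             return False
--         for i in range(3, int(num**0.5) + 1, 2):
--             if num % i == 0:
--                 return False
--         return True
--
--     def has_seven(num):
--         return '7' in str(num)
--
--     def digit_sum_divisible_by_2(num):
--         return sum(int(digit) for digit in str(num)) % 2 == 0
--
--     counter = 0
--
--     for i in range(2, n + 1):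
--         if (
--             is_prime(i) and
--             has_seven(i) and
--             digit_sum_divisible_by_2(i)
--         ):
--             counter += 1
--
--     return counter
-- ===== SOURCE B (Python) =====
-- def seven_six_ten(n: int) -> int:
--     if n < 2:
--         return 0
--
--     def has_seven(num):
--         return '7' in str(num)
--
--     def digit_sum_divisible_by_2(num):
--         return sum(int(digit) for digit in str(num)) % 2 == 0
--
--     # mark every proper multiple q = p*p, p*p+p, ... of every p up to sqrt(n)
--     sieve = [True] * (n + 1)
--     sieve[0] = False
--     sieve[1] = False
--     for p in range(2, int(n ** 0.5) + 1):
--         for q in range(p * p, n + 1, p):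
--             sieve[q] = False
--
--     count = 0
--     for i in range(2, n + 1):
--         if sieve[i] and has_seven(i) and digit_sum_divisible_by_2(i):
--             count += 1
--     return count
-- ===== Notes on version B (the rewrite author's own statement) =====
-- stated objective: faster
-- what changed: Per-candidate trial division (odd divisors up to sqrt) is replaced by one sieve over [0..n] that marks multiples of every p up to sqrt(n), after which primality is a table lookup.
import Mathlib
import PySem

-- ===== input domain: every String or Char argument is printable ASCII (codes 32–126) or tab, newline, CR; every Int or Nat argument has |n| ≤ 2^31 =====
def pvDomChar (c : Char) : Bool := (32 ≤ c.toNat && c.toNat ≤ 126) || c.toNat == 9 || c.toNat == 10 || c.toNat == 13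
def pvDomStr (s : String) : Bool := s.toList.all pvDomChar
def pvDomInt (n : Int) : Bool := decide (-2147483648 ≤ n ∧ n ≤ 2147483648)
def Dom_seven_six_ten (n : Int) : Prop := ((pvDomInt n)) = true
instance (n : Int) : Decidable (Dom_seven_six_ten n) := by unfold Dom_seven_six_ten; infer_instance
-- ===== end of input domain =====

-- B replaces A's per-candidate trial division by a multiple-marking sieve over [0..n]
-- (objective: faster, asymptotically). Both programs share the digit checks verbatim.

-- int(num**0.5): exact for 0 ≤ num ≤ 2^31 because the double sqrt of such num is within
-- half an ulp and cannot cross an integer, so it truncates to the integer square root.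
def pvIsqrt (num : Int) : Int := ((Nat.sqrt num.toNat : Nat) : Int)

-- '7' in str(num)
def pvHasSeven (num : Int) : Bool := PySem.Chars.isIn ['7'] (PySem.Int.toChars num)

-- sum(int(digit) for digit in str(num)) % 2 == 0; int(digit) via ofChars? (its getD 0
-- default never fires on the digits of the nonnegative num this is applied to)
def pvEvenDigitSum (num : Int) : Bool :=
  PySem.Int.mod (((PySem.Int.toChars num).map
    (fun digit => (PySem.Int.ofChars? [digit]).getD 0)).sum) 2 == 0

-- ===== PORT A =====
-- is_prime: the membership/parity guards, then the odd-step trial-division loop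
-- (the loop's early 'return False' is the pure .all over the same range)
def pvIsPrimeA (num : Int) : Bool :=
  if num = 2 ∨ num = 3 then true
  else if num < 2 ∨ PySem.Int.mod num 2 = 0 then false
  else (PySem.List.pyRange 3 (pvIsqrt num + 1) 2).all (fun i => !(PySem.Int.mod num i == 0))

def seven_six_ten (n : Int) : Int :=
  (PySem.List.pyRange 2 (n + 1) 1).foldl
    (fun counter i =>
      if pvIsPrimeA i && pvHasSeven i && pvEvenDigitSum i then counter + 1 else counter) 0

-- ===== PORT B =====
-- the sieve loop: sieve[q] = False for q in range(p*p, n+1, p), p in range(2, isqrt(n)+1)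
-- (indices q, p are ≥ 0 here, so .toNat is Python's nonnegative list indexing)
def pvSieve (n : Int) : List Bool :=
  (PySem.List.pyRange 2 (pvIsqrt n + 1) 1).foldl
    (fun sv p =>
      (PySem.List.pyRange (p * p) (n + 1) p).foldl (fun sv q => sv.set q.toNat false) sv)
    (((List.replicate (n + 1).toNat true).set 0 false).set 1 false)

def seven_six_ten_alt (n : Int) : Int :=
  if n < 2 then 0
  else
    let sieve := pvSieve n
    (PySem.List.pyRange 2 (n + 1) 1).foldl
      (fun count i =>
        if PySem.List.pyGetD sieve i false && pvHasSeven i && pvEvenDigitSum i then count + 1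
        else count) 0

-- ===== PRECONDITION & SPEC =====
def Spec_seven_six_ten (n : Int) (out : Int) : Prop := out = seven_six_ten_alt n
instance (n : Int) (out : Int) : Decidable (Spec_seven_six_ten n out) := by unfold Spec_seven_six_ten; infer_instance

-- ===== CLAIM (what is proved, stated in full; the proofs are below) =====
def Claim_equal_seven_six_ten : Prop := ∀ (n : Int), Dom_seven_six_ten n → Spec_seven_six_ten n (seven_six_ten n)

-- ===== LEMMAS AND PROOFS =====

-- A's trial division decides primality of i.toNat (for i ≥ 2)
theorem pvIsPrimeA_iff (i : Int) (h2 : 2 ≤ i) : pvIsPrimeA i = true ↔ Nat.Prime i.toNat := by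
  obtain ⟨m, rfl⟩ : ∃ m : Nat, i = (m : Int) := ⟨i.toNat, by omega⟩
  by_cases h23 : (m : Int) = 2 ∨ (m : Int) = 3
  · rcases h23 with h | h
    · have : m = 2 := by omega
      subst this; decide
    · have : m = 3 := by omega
      subst this; decide
  · unfold pvIsPrimeA
    rw [if_neg h23]
    by_cases hev : PySem.Int.mod (m : Int) 2 = 0
    · rw [if_pos (Or.inr hev)]
      rw [PySem.Int.mod_eq_zero_iff_dvd] at hev
      have h2m : 2 ∣ m := by exact_mod_cast hev
      simp only [Int.toNat_natCast, Bool.false_eq_true, false_iff]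
      intro hp
      rcases (hp.eq_one_or_self_of_dvd 2 h2m) with h | h <;> omega
    · have hno : ¬ ((m : Int) < 2 ∨ PySem.Int.mod (m : Int) 2 = 0) := by
        rintro (h | h)
        · omega
        · exact hev h
      rw [if_neg hno, List.all_eq_true]
      have hodd : ¬ 2 ∣ m := by
        intro h; exact hev (by rw [PySem.Int.mod_eq_zero_iff_dvd]; exact_mod_cast h)
      simp only [Int.toNat_natCast]
      have hsq : pvIsqrt (m : Int) = ((Nat.sqrt m : Nat) : Int) := by
        simp [pvIsqrt]
      constructor
      · intro hall
        rw [Nat.prime_def_le_sqrt]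
        refine ⟨by omega, ?_⟩
        intro k hk2 hksqrt hkdvd
        by_cases hke : 2 ∣ k
        · exact hodd (dvd_trans hke hkdvd)
        · have hk3 : 3 ≤ k := by omega
          have hmem : (k : Int) ∈ PySem.List.pyRange 3 (pvIsqrt (m : Int) + 1) 2 := by
            rw [PySem.List.mem_pyRange_iff_of_pos (by norm_num)]
            refine ⟨by exact_mod_cast hk3, ?_, ?_⟩
            · rw [hsq]; exact_mod_cast Nat.lt_succ_of_le hksqrt
            · omega
          have := hall _ hmem
          simp only [Bool.not_eq_eq_eq_not, Bool.not_true, beq_eq_false_iff_ne, ne_eq] at this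
          exact this ((PySem.Int.mod_eq_zero_iff_dvd _ _).mpr (by exact_mod_cast hkdvd))
      · intro hp x hx
        rw [PySem.List.mem_pyRange_iff_of_pos (by norm_num)] at hx
        obtain ⟨hx3, hxlt, _⟩ := hx
        rw [hsq] at hxlt
        simp only [Bool.not_eq_eq_eq_not, Bool.not_true, beq_eq_false_iff_ne, ne_eq]
        rw [PySem.Int.mod_eq_zero_iff_dvd]
        intro hdvd
        obtain ⟨kx, rfl⟩ : ∃ kx : Nat, x = (kx : Int) := ⟨x.toNat, by omega⟩
        have hkdvd : kx ∣ m := by exact_mod_cast hdvd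
        have hsqlt : Nat.sqrt m < m := Nat.sqrt_lt_self (by omega)
        rcases hp.eq_one_or_self_of_dvd kx hkdvd with h | h <;> omega

-- the inner marking fold preserves length
theorem length_foldl_set (qs : List Int) (sv : List Bool) :
    (qs.foldl (fun sv q => sv.set q.toNat false) sv).length = sv.length := by
  induction qs generalizing sv with
  | nil => rfl
  | cons q qs ih => simp [List.foldl_cons, ih]

-- element j of a fold of in-place falsifications
theorem foldl_set_false_getElem? (qs : List Int) (sv : List Bool) (j : Nat)
    (hj : j < sv.length) :
    ((qs.foldl (fun sv q => sv.set q.toNat false) sv))[j]? =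
      if qs.any (fun q => q.toNat == j) then some false else sv[j]? := by
  induction qs generalizing sv with
  | nil => simp
  | cons q qs ih =>
    rw [List.foldl_cons, ih _ (by simp [hj])]
    by_cases h1 : qs.any (fun q => q.toNat == j) = true <;> by_cases h2 : q.toNat = j <;>
      simp [h1, h2, List.any_cons, hj]

-- element j of the nested sieve-marking fold
theorem foldl_sieve_getElem? (ps : List Int) (n : Int) (sv : List Bool) (j : Nat)
    (hj : j < sv.length) :
    ((ps.foldl (fun sv p =>
        (PySem.List.pyRange (p * p) (n + 1) p).foldl (fun sv q => sv.set q.toNat false) sv)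
        sv))[j]? =
      if ps.any (fun p => (PySem.List.pyRange (p * p) (n + 1) p).any (fun q => q.toNat == j))
      then some false else sv[j]? := by
  induction ps generalizing sv with
  | nil => simp
  | cons p ps ih =>
    rw [List.foldl_cons, ih _ (by rw [length_foldl_set]; exact hj)]
    rw [foldl_set_false_getElem? _ _ _ hj]
    by_cases h1 : ps.any
        (fun p => (PySem.List.pyRange (p * p) (n + 1) p).any (fun q => q.toNat == j)) = true <;>
      by_cases h2 : (PySem.List.pyRange (p * p) (n + 1) p).any (fun q => q.toNat == j) = true <;>
      simp [h1, h2, List.any_cons]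

-- the sieve's entry i is primality of i.toNat (for 2 ≤ i ≤ n)
theorem pvSieve_iff (n i : Int) (h2 : 2 ≤ i) (hn : i ≤ n) :
    (PySem.List.pyGetD (pvSieve n) i false = true) ↔ Nat.Prime i.toNat := by
  obtain ⟨m, rfl⟩ : ∃ m : Nat, i = (m : Int) := ⟨i.toNat, by omega⟩
  obtain ⟨N, rfl⟩ : ∃ N : Nat, n = (N : Int) := ⟨n.toNat, by omega⟩
  have hm2 : 2 ≤ m := by exact_mod_cast h2
  have hmN : m ≤ N := by exact_mod_cast hn
  have hlen : (((List.replicate ((N : Int) + 1).toNat true).set 0 false).set 1 false).length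
      = N + 1 := by simp only [List.length_set, List.length_replicate]; omega
  have hinit : (((List.replicate ((N : Int) + 1).toNat true).set 0 false).set 1 false)[m]?
      = some true := by
    rw [List.getElem?_set, List.getElem?_set]
    rw [if_neg (by omega), if_neg (by omega), List.getElem?_replicate, if_pos (by omega)]
  have hmark : (∃ p ∈ PySem.List.pyRange 2 (pvIsqrt (N : Int) + 1) 1,
      ∃ q ∈ PySem.List.pyRange (p * p) ((N : Int) + 1) p, q.toNat = m) ↔
      ¬ Nat.Prime m := by
    constructor
    · rintro ⟨p, hp, q, hq, hqm⟩
      rw [PySem.List.mem_pyRange_one] at hp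
      rw [PySem.List.mem_pyRange_iff_of_pos (by omega)] at hq
      obtain ⟨hq1, hq2, hq3⟩ := hq
      have hq0 : 0 ≤ q := by nlinarith [hp.1]
      have hqi : q = (m : Int) := by omega
      subst hqi
      have hpd : p ∣ (m : Int) := by
        have hpp : p ∣ p * p := ⟨p, rfl⟩
        have := dvd_add hq3 hpp
        simpa using this
      obtain ⟨pk, rfl⟩ : ∃ pk : Nat, p = (pk : Int) := ⟨p.toNat, by omega⟩
      have hpk2 : 2 ≤ pk := by exact_mod_cast hp.1
      have hpkd : pk ∣ m := by exact_mod_cast hpd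
      have hpksq : pk * pk ≤ m := by exact_mod_cast hq1
      intro hprime
      rcases hprime.eq_one_or_self_of_dvd pk hpkd with h | h <;> nlinarith
    · intro hnp
      have hkp : Nat.Prime m.minFac := Nat.minFac_prime (by omega)
      have hk2 : 2 ≤ m.minFac := hkp.two_le
      have hkd : m.minFac ∣ m := Nat.minFac_dvd m
      have hksq : m.minFac * m.minFac ≤ m := by
        have := Nat.minFac_sq_le_self (n := m) (by omega) hnp
        nlinarith [this]
      have hksqrt : m.minFac ≤ Nat.sqrt N := Nat.le_sqrt.mpr (le_trans hksq hmN)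
      refine ⟨(m.minFac : Int), ?_, (m : Int), ?_, by simp⟩
      · rw [PySem.List.mem_pyRange_one]
        constructor
        · exact_mod_cast hk2
        · simp only [pvIsqrt, Int.toNat_natCast]
          exact_mod_cast Nat.lt_succ_of_le hksqrt
      · rw [PySem.List.mem_pyRange_iff_of_pos (by exact_mod_cast hk2.trans_lt' Nat.zero_lt_two)]
        refine ⟨by exact_mod_cast hksq, by exact_mod_cast Nat.lt_succ_of_le hmN, ?_⟩
        have hd1 : ((m.minFac : Nat) : Int) ∣ (m : Int) := by exact_mod_cast hkd
        have hd2 : ((m.minFac : Nat) : Int) ∣ ((m.minFac : Nat) : Int) * ((m.minFac : Nat) : Int) :=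
          ⟨(m.minFac : Int), rfl⟩
        exact dvd_sub hd1 hd2
  unfold pvSieve
  rw [PySem.List.pyGetD_of_nonneg _ _ (by positivity), List.getD_eq_getElem?_getD,
    Int.toNat_natCast, foldl_sieve_getElem? _ _ _ _ (by omega)]
  by_cases hmk : (PySem.List.pyRange 2 (pvIsqrt (N : Int) + 1) 1).any
      (fun p => (PySem.List.pyRange (p * p) ((N : Int) + 1) p).any (fun q => q.toNat == m)) = true
  · rw [if_pos hmk]
    simp only [List.any_eq_true, beq_iff_eq] at hmk
    simp only [Option.getD_some, Bool.false_eq_true, false_iff]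
    exact hmark.mp hmk
  · rw [if_neg hmk, hinit]
    simp only [List.any_eq_true, beq_iff_eq] at hmk
    simp only [Option.getD_some, true_iff]
    have := (not_iff_not.mpr hmark).mp hmk
    simpa using this

-- ===== VERDICT (by name: the statement is the Claim_ definition above) =====
theorem seven_six_ten_spec : Claim_equal_seven_six_ten := by
  intro n _
  unfold Spec_seven_six_ten seven_six_ten seven_six_ten_alt
  by_cases hn : n < 2
  · rw [if_pos hn, PySem.List.pyRange_one_eq_nil (by omega)]
    simp
  · rw [if_neg hn]
    apply PySem.List.foldl_congr_mem
    intro acc i hi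
    rw [PySem.List.mem_pyRange_one] at hi
    have hip : pvIsPrimeA i = PySem.List.pyGetD (pvSieve n) i false := by
      have ha := pvIsPrimeA_iff i hi.1
      have hb := pvSieve_iff n i hi.1 (by omega)
      cases hA : pvIsPrimeA i <;> cases hB : PySem.List.pyGetD (pvSieve n) i false <;>
        simp_all
    rw [hip]
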